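-- pv_equiv track=rewrite | github.com/flybywind/job_review | asus_r3.py | interleaving
-- ===== SOURCE A (Python) =====
-- def interleaving(arr):
--     n = len(arr)
--     half = n//2
--     for k in range(1, half):
--         # swap i, half+i-1
--         i = k*2-1
--         tmp = arr[i]
--         arr[i] = arr[half+k-1]
--         for j in range(i+1, half+k):
--             tmp2 = arr[j]
--             arr[j] = tmp
--             tmp = tmp2
--     return arr
-- ===== SOURCE B (Python) =====
-- def interleaving(arr):
--     # One pass: build the interleaved prefix by zipping the two halves,
--     # then write it back in place (same observable mutation as A).
--     half = len(arr) // 2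
--     arr[:2 * half] = [v for pair in zip(arr[:half], arr[half:]) for v in pair]
--     return arr
-- ===== Notes on version B (the rewrite author's own statement) =====
-- stated objective: faster
-- what changed: A repeatedly rotates a growing block right by one (a nested shift loop) to bring each second-half element into place; B builds the interleaved prefix in a single pass by zipping the two halves and assigns it back in one slice write.
import Mathlib
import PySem

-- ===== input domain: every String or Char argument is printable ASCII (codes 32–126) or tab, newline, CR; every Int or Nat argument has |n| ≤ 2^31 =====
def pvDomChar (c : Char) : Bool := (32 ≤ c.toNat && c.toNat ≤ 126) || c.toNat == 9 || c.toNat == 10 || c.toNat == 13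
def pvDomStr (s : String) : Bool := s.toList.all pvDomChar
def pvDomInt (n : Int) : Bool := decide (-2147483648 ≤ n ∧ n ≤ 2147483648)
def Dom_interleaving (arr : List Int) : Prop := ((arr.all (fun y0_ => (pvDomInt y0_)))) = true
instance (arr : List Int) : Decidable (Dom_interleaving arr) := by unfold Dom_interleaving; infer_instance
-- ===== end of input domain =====

-- B interleaves the two halves in one pass (zip + flatten) instead of A's nested
-- block-rotation loops; both Pythons mutate the argument list to the same final
-- content, and the equivalence proved here is about the returned value.

-- ===== PORT A =====
-- the inner 'for j' loop body: tmp2 = arr[j]; arr[j] = tmp; tmp = tmp2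
def pvInnerStep (st : List Int × Int) (j : Int) : List Int × Int :=
  let tmp2 := PySem.List.pyGetD st.1 j 0
  (PySem.List.pySetD st.1 j st.2, tmp2)

-- the outer 'for k' loop body (every index touched is in range, 1 ≤ i < len, so pyGetD/pySetD are exact)
def pvOuterStep (half : Int) (arr : List Int) (k : Int) : List Int :=
  let i := k * 2 - 1
  let tmp := PySem.List.pyGetD arr i 0
  let arr1 := PySem.List.pySetD arr i (PySem.List.pyGetD arr (half + k - 1) 0)
  ((PySem.List.pyRange (i + 1) (half + k) 1).foldl pvInnerStep (arr1, tmp)).1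

def interleaving (arr : List Int) : List Int :=
  let n : Int := PySem.List.len arr
  let half := PySem.Int.floordiv n 2
  (PySem.List.pyRange 1 half 1).foldl (pvOuterStep half) arr

-- ===== PORT B =====
def interleaving_alt (arr : List Int) : List Int :=
  let half := arr.length / 2
  ((arr.take half).zip (arr.drop half)).flatMap (fun p => [p.1, p.2])
    ++ arr.drop (2 * half)

-- ===== PRECONDITION & SPEC =====
def Spec_interleaving (arr : List Int) (out : List Int) : Prop := out = interleaving_alt arr
instance (arr : List Int) (out : List Int) : Decidable (Spec_interleaving arr out) := by unfold Spec_interleaving; infer_instance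

-- ===== CLAIM (what is proved, stated in full; the proofs are below) =====
def Claim_equal_interleaving : Prop := ∀ (arr : List Int), Dom_interleaving arr → Spec_interleaving arr (interleaving arr)

-- ===== LEMMAS AND PROOFS =====

-- interleave two lists pairwise (the shape B builds)
def pvIlv (a b : List Int) : List Int := (a.zip b).flatMap (fun p => [p.1, p.2])

-- the invariant: the list contents after the first k outer iterations of A
def pvState (a b t : List Int) (k : Nat) : List Int :=
  pvIlv (a.take k) (b.take k) ++ a.drop k ++ b.drop k ++ t

lemma pvGetD_at_len (P : List Int) (x : Int) (rest : List Int) :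
    PySem.List.pyGetD (P ++ x :: rest) ((P.length : Nat) : Int) 0 = x := by simp

lemma pvSetD_at_len (P : List Int) (x v : Int) (rest : List Int) :
    PySem.List.pySetD (P ++ x :: rest) ((P.length : Nat) : Int) v = P ++ v :: rest := by simp

-- A's inner loop rotates the written block right by one (tmp-chain shift)
lemma pvInner_shift (M : List Int) : ∀ (P S : List Int) (tmp : Int),
    (PySem.List.pyRange (P.length) (P.length + M.length) 1).foldl pvInnerStep (P ++ M ++ S, tmp)
      = (P ++ (tmp :: M).dropLast ++ S, (tmp :: M).getLastD 0) := by
  induction M with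
  | nil => intro P S tmp; simp [PySem.List.pyRange_one_eq_nil]
  | cons m M ih =>
    intro P S tmp
    rw [PySem.List.pyRange_one_cons (by push_cast [List.length_cons]; omega)]
    rw [List.foldl_cons]
    have h1 : pvInnerStep (P ++ m :: M ++ S, tmp) (P.length : Int)
        = ((P ++ [tmp]) ++ M ++ S, m) := by
      simp [pvInnerStep, PySem.List.pyGetD_natCast, PySem.List.pySetD_natCast]
    rw [h1]
    rw [show ((P.length : Int) + 1) = (((P ++ [tmp]).length : Nat) : Int) by simp]
    rw [show ((P.length : Int) + ((m :: M).length : Int)) = (((P ++ [tmp]).length : Nat) : Int) + M.length by simp; omega]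
    rw [ih (P ++ [tmp]) S m]
    simp

-- one outer iteration on a fully decomposed state
lemma pvOuter_core (pref R tb t : List Int) (x y w : Int) (j half : Nat)
    (hpref : pref.length = 2 * j) (hhalf : half = j + 2 + R.length) :
    pvOuterStep (half : Int) (pref ++ x :: y :: (R ++ w :: (tb ++ t))) ((j : Int) + 1)
      = (pref ++ [x, w]) ++ y :: (R ++ (tb ++ t)) := by
  simp only [pvOuterStep]
  rw [show ((j : Int) + 1) * 2 - 1 = (((pref ++ [x]).length : Nat) : Int) by
    simp [hpref]; omega]
  rw [show pref ++ x :: y :: (R ++ w :: (tb ++ t)) = (pref ++ [x]) ++ y :: (R ++ w :: (tb ++ t)) by simp]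
  rw [pvGetD_at_len]
  rw [show ((half : Int) + ((j : Int) + 1) - 1)
      = (((pref ++ x :: y :: R).length : Nat) : Int) by simp [hpref, hhalf]; omega]
  rw [show (pref ++ [x]) ++ y :: (R ++ w :: (tb ++ t)) = (pref ++ x :: y :: R) ++ w :: (tb ++ t) by simp]
  rw [pvGetD_at_len]
  rw [show (pref ++ x :: y :: R) ++ w :: (tb ++ t) = (pref ++ [x]) ++ y :: (R ++ w :: (tb ++ t)) by simp]
  rw [pvSetD_at_len]
  rw [show (pref ++ [x]) ++ w :: (R ++ w :: (tb ++ t)) = (pref ++ [x, w]) ++ (R ++ [w]) ++ (tb ++ t) by simp]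
  rw [show ((((pref ++ [x]).length : Nat) : Int) + 1) = (((pref ++ [x, w]).length : Nat) : Int) by
    simp; omega]
  rw [show ((half : Int) + ((j : Int) + 1)) = (((pref ++ [x, w]).length : Nat) : Int) + (((R ++ [w]).length : Nat) : Int) by
    simp [hpref, hhalf]; omega]
  rw [pvInner_shift]
  have hd : (y :: (R ++ [w])).dropLast = y :: R := by
    rw [show y :: (R ++ [w]) = (y :: R) ++ [w] by simp, List.dropLast_concat]
  rw [hd]
  simp

lemma pvIlv_append {a1 a2 b1 b2 : List Int} (h : a1.length = b1.length) :
    pvIlv (a1 ++ a2) (b1 ++ b2) = pvIlv a1 b1 ++ pvIlv a2 b2 := by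
  simp [pvIlv, List.zip_append h]

lemma pvFlat_length : ∀ (l : List (Int × Int)), (l.flatMap (fun p => [p.1, p.2])).length = 2 * l.length := by
  intro l; induction l with
  | nil => simp
  | cons p l ih => simp [ih]; ring

lemma pvIlv_length (a b : List Int) (h : a.length = b.length) :
    (pvIlv a b).length = 2 * a.length := by
  rw [pvIlv, pvFlat_length, List.length_zip, h]
  simp

lemma pvTake_succ_eq (a : List Int) (j : Nat) (h : j < a.length) :
    a.take (j + 1) = a.take j ++ [a[j]] := by
  rw [List.take_add_one]; simp [List.getElem?_eq_getElem h]

-- one outer iteration advances the invariant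
lemma pvOuter_step (a b t : List Int) (hb : b.length = a.length) (j : Nat)
    (hj : j + 1 < a.length) :
    pvOuterStep (a.length : Int) (pvState a b t j) ((j : Int) + 1) = pvState a b t (j + 1) := by
  have hja : j < a.length := by omega
  have hjb : j < b.length := by omega
  have ha1 : a.drop j = a[j] :: a.drop (j+1) := List.drop_eq_getElem_cons hja
  have ha2 : a.drop (j+1) = a[j+1] :: a.drop (j+2) := List.drop_eq_getElem_cons (by omega)
  have hb1 : b.drop j = b[j] :: b.drop (j+1) := List.drop_eq_getElem_cons hjb
  have hst : pvState a b t j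
      = pvIlv (a.take j) (b.take j) ++ a[j] :: a[j+1] :: (a.drop (j+2) ++ b[j] :: (b.drop (j+1) ++ t)) := by
    unfold pvState
    rw [ha1, ha2, hb1]
    simp only [List.append_assoc, List.cons_append]
  rw [hst, pvOuter_core _ _ _ _ _ _ _ j a.length
      (by rw [pvIlv_length _ _ (by simp [hb])]; simp; omega)
      (by simp; omega)]
  have h1 : pvState a b t (j+1)
      = (pvIlv (a.take j) (b.take j) ++ [a[j], b[j]]) ++ a[j+1] :: (a.drop (j+2) ++ (b.drop (j+1) ++ t)) := by
    unfold pvState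
    rw [pvTake_succ_eq a j hja, pvTake_succ_eq b j hjb,
      pvIlv_append (by simp only [List.length_take]; omega), ha2,
      show pvIlv [a[j]] [b[j]] = [a[j], b[j]] from rfl]
    simp only [List.append_assoc, List.cons_append, List.nil_append]
  rw [h1]

-- the whole outer fold carries the invariant to the end
lemma pvOuter_fold (a b t : List Int) (hb : b.length = a.length) :
    ∀ (d j : Nat), j + d = a.length → 1 ≤ j →
    (PySem.List.pyRange (j : Int) (a.length : Int) 1).foldl (pvOuterStep (a.length : Int))
        (pvState a b t (j - 1)) = pvState a b t (a.length - 1) := by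
  intro d
  induction d with
  | zero =>
    intro j hj _
    rw [PySem.List.pyRange_one_eq_nil (by omega)]
    simp; congr 1; omega
  | succ d ih =>
    intro j hj hj1
    rw [PySem.List.pyRange_one_cons (by omega)]
    rw [List.foldl_cons]
    have hstep := pvOuter_step a b t hb (j - 1) (by omega)
    have hc1 : (((j : Nat) - 1 : Nat) : Int) + 1 = (j : Int) := by omega
    rw [hc1] at hstep
    rw [show (j : Nat) - 1 + 1 = j by omega] at hstep
    rw [hstep]
    have hres := ih (j + 1) (by omega) (by omega)
    rw [show ((j + 1 : Nat) : Int) = (j : Int) + 1 by push_cast; ring] at hres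
    rw [show (j + 1) - 1 = j by omega] at hres
    exact hres

lemma pvZip_trunc : ∀ (a b t : List Int), a.length ≤ b.length → a.zip (b ++ t) = a.zip b := by
  intro a
  induction a with
  | nil => simp
  | cons x a ih =>
    intro b t h
    cases b with
    | nil => simp at h
    | cons y b => simp_all

-- B's value in terms of the half decomposition
lemma pvAlt_eq (arr a b t : List Int) (h : Nat) (hh : h = arr.length / 2)
    (ha : a = arr.take h) (hbb : b = (arr.drop h).take h) (ht : t = arr.drop (2*h))
    (hlb : b.length = h) :
    interleaving_alt arr = pvIlv a b ++ t := by
  have hsplit : arr.drop h = b ++ t := by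
    rw [hbb, ht, show 2*h = h + h by ring, ← List.drop_drop]
    simp
  simp only [interleaving_alt, ← hh, ← ha, ← ht, hsplit]
  rw [pvZip_trunc a b t (by rw [hlb, ha]; simp)]
  rfl

-- the final invariant state is exactly the interleaving
lemma pvState_last (a b t : List Int) (h : Nat) (h1 : 1 ≤ h)
    (hla : a.length = h) (hlb : b.length = h) :
    pvState a b t (h - 1) = pvIlv a b ++ t := by
  have hda : a.drop (h-1) = [a[h-1]'(by omega)] := by
    rw [List.drop_eq_getElem_cons (by omega)]
    have hnil : a.drop (h-1+1) = [] := by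
      rw [show h-1+1 = h by omega, ← hla, List.drop_length]
    rw [hnil]
  have hdb : b.drop (h-1) = [b[h-1]'(by omega)] := by
    rw [List.drop_eq_getElem_cons (by omega)]
    have hnil : b.drop (h-1+1) = [] := by
      rw [show h-1+1 = h by omega, ← hlb, List.drop_length]
    rw [hnil]
  have hsa : a = a.take (h-1) ++ a.drop (h-1) := by simp
  have hsb : b = b.take (h-1) ++ b.drop (h-1) := by simp
  unfold pvState
  conv_rhs => rw [hsa, hsb, pvIlv_append (by simp only [List.length_take]; omega)]
  rw [hda, hdb]
  simp [pvIlv]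

-- ===== VERDICT (by name: the statement is the Claim_ definition above) =====
theorem interleaving_spec : Claim_equal_interleaving := by
  intro arr _
  unfold Spec_interleaving interleaving
  simp only [PySem.List.len_eq]
  rw [show PySem.Int.floordiv (arr.length : Int) 2 = ((arr.length / 2 : Nat) : Int) from
    PySem.Int.floordiv_natCast arr.length 2]
  by_cases h0 : arr.length / 2 = 0
  · rw [h0]
    rw [PySem.List.pyRange_one_eq_nil (by omega)]
    simp [interleaving_alt, h0]
  · set h := arr.length / 2 with hh
    have h1 : 1 ≤ h := by omega
    have hhl : 2 * h ≤ arr.length := by omega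
    set a := arr.take h with ha
    set b := (arr.drop h).take h with hbdef
    set t := arr.drop (2*h) with ht
    have hla : a.length = h := by rw [ha]; simp; omega
    have hlb : b.length = h := by rw [hbdef]; simp; omega
    have harr : arr = a ++ (b ++ t) := by
      rw [ha, hbdef, ht, show 2*h = h + h by ring, ← List.drop_drop]
      simp
    have hfold := pvOuter_fold a b t (by omega) (h - 1) 1 (by omega) (by omega)
    rw [hla] at hfold
    have hinit : pvState a b t (1 - 1) = a ++ (b ++ t) := by
      simp [pvState, pvIlv]
    rw [hinit] at hfold
    rw [show ((1 : Nat) : Int) = (1 : Int) by simp] at hfold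
    conv_lhs => rw [harr]
    rw [hfold]
    rw [pvState_last a b t h h1 hla hlb]
    rw [pvAlt_eq arr a b t h hh ha hbdef ht hlb]
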